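-- pv_equiv track=rewrite | github.com/YoLoveLife/DevOps | utils/dns.py | dnsnameget
-- ===== SOURCE A (Python) =====
-- def dnsnameget(filename):
--     list=filename.split('.')
--     dnsname=""
--     for i in list:
--         if i == "zone":
--             break
--         else:
--             dnsname+=i+"."
--     return dnsname[0:-1]
-- ===== SOURCE B (Python) =====
-- def dnsnameget(filename):
--     parts = filename.split('.')
--     idx = parts.index('zone') if 'zone' in parts else len(parts)
--     return '.'.join(parts[:idx])
-- ===== Notes on version B (the rewrite author's own statement) =====
-- stated objective: simpler
-- what changed: Replaces A's accumulate-string-with-trailing-dots-then-break-then-strip-last-char loop by locating the 'zone' sentinel index, slicing the parts before it and joining them with '.'.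
import Mathlib
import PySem

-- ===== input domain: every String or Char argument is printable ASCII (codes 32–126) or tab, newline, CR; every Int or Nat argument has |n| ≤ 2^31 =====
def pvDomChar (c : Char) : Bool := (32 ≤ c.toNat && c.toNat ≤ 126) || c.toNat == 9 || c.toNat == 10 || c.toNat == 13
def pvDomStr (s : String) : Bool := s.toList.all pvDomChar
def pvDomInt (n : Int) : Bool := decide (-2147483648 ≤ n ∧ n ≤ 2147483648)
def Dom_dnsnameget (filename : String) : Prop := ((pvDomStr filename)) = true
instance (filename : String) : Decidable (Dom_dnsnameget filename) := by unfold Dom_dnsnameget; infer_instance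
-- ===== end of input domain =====

-- B replaces A's accumulate-with-break loop by find-the-sentinel-index, slice, join (objective: simpler).

-- ===== PORT A =====
-- the 'for i in list: if i == "zone": break else dnsname += i + "."' loop, with break as recursion stop
def dnsnamegetLoop : List String → String → String
  | [], acc => acc
  | i :: rest, acc => if i == "zone" then acc else dnsnamegetLoop rest (acc ++ i ++ ".")

def dnsnameget (filename : String) : String :=
  let list := (PySem.Str.split? filename ".").getD []   -- sep "." is nonempty, so split? is always some
  let dnsname := dnsnamegetLoop list ""
  PySem.Str.slice dnsname (some 0) (some (-1))

-- ===== PORT B =====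
def dnsnameget_alt (filename : String) : String :=
  let parts := (PySem.Str.split? filename ".").getD []
  let idx : Int := match PySem.List.index? parts "zone" with
    | some k => (k : Int)
    | none => (parts.length : Int)
  PySem.Str.join "." (PySem.List.slice parts none (some idx))

-- ===== PRECONDITION & SPEC =====
def Spec_dnsnameget (filename : String) (out : String) : Prop := out = dnsnameget_alt filename
instance (filename : String) (out : String) : Decidable (Spec_dnsnameget filename out) := by unfold Spec_dnsnameget; infer_instance

-- ===== CLAIM (what is proved, stated in full; the proofs are below) =====
def Claim_equal_dnsnameget : Prop := ∀ (filename : String), Dom_dnsnameget filename → Spec_dnsnameget filename (dnsnameget filename)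

-- ===== LEMMAS AND PROOFS =====

-- A's loop appends x ++ "." for every part before the first "zone"
theorem dnsnamegetLoop_eq (ps : List String) (acc : String) :
    (dnsnamegetLoop ps acc).toList
      = acc.toList ++ ((ps.takeWhile (fun x => !(x == "zone"))).map (fun x => x.toList ++ ['.'])).flatten := by
  induction ps generalizing acc with
  | nil => simp [dnsnamegetLoop]
  | cons i rest ih =>
    by_cases h : i = "zone"
    · simp [dnsnamegetLoop, h]
    · simp [dnsnamegetLoop, h, ih]

-- B's take-up-to-first-"zone" is A's takeWhile
theorem take_index?_eq_takeWhile (ps : List String) :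
    ps.take ((PySem.List.index? ps "zone").getD ps.length)
      = ps.takeWhile (fun x => !(x == "zone")) := by
  induction ps with
  | nil => simp
  | cons x rest ih =>
    by_cases h : x = "zone"
    · simp [PySem.List.index?, List.idxOf?_cons, h]
    · rw [PySem.List.index?_cons_of_ne rest h]
      cases hk : PySem.List.index? rest "zone" with
      | none => rw [hk] at ih; simpa [List.takeWhile_cons, h] using ih
      | some k => rw [hk] at ih; simpa [List.takeWhile_cons, h] using ih

-- dropping the trailing '.' from the flattened "x." blocks is the '.'-join
theorem dropLast_flatten_eq_join (p : List String) :
    (((p.map (fun x => x.toList ++ ['.'])).flatten)).dropLast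
      = PySem.Chars.join ['.'] (p.map String.toList) := by
  induction p with
  | nil => simp [PySem.Chars.join_nil]
  | cons x rest ih =>
    cases rest with
    | nil => simp [PySem.Chars.join_singleton]
    | cons y ys =>
      have hne : ((((y :: ys).map (fun x => x.toList ++ ['.'])).flatten)) ≠ [] := by
        simp
      rw [List.map_cons, List.flatten_cons, List.dropLast_append_of_ne_nil hne, ih]
      simp [PySem.Chars.join_cons_cons]

-- ===== VERDICT (by name: the statement is the Claim_ definition above) =====
theorem dnsnameget_spec : Claim_equal_dnsnameget := by
  intro filename _
  unfold Spec_dnsnameget dnsnameget dnsnameget_alt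
  apply String.toList_injective
  generalize (PySem.Str.split? filename ".").getD [] = ps
  have hidx : (match PySem.List.index? ps "zone" with
               | some k => (k : Int)
               | none => (ps.length : Int))
      = (((PySem.List.index? ps "zone").getD ps.length : Nat) : Int) := by
    cases PySem.List.index? ps "zone" <;> simp
  simp only [PySem.Str.toList_slice, PySem.Str.toList_join, PySem.Chars.slice_eq_listSlice,
    PySem.List.slice_zero_start, PySem.List.slice_to_neg_one, hidx, PySem.List.slice_to_natCast]
  rw [dnsnamegetLoop_eq, take_index?_eq_takeWhile, show (".".toList : List Char) = ['.'] from rfl,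
    ← dropLast_flatten_eq_join]
  simp
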